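-- pv_equiv track=rewrite | github.com/xiaotianluo0613/master-thesis | scripts/archive/generate_document_type_full_examples.py | choose_examples_by_type
-- ===== SOURCE A (Python) =====
-- from collections import defaultdict
-- from typing import Dict, List, Tuple
--
-- def choose_examples_by_type(rows: List[Dict], per_type: int) -> Dict[str, List[Dict]]:
--     grouped = defaultdict(list)
--     for r in rows:
--         grouped[r['document_type']].append(r)
--
--     # Stable selection: sort by volume_id, then take first N
--     chosen = {}
--     for doc_type, items in grouped.items():
--         items_sorted = sorted(items, key=lambda x: x['volume_id'])
--         chosen[doc_type] = items_sorted[:per_type]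
--     return chosen
-- ===== SOURCE B (Python) =====
-- def choose_examples_by_type(rows, per_type):
--     # One global pass to fix key order, then per-type filter + sort + cut.
--     order = []
--     for r in rows:
--         t = r['document_type']
--         if t not in order:
--             order.append(t)
--     return {t: sorted([r for r in rows if r['document_type'] == t],
--                       key=lambda x: x['volume_id'])[:per_type]
--             for t in order}
-- ===== Notes on version B (the rewrite author's own statement) =====
-- stated objective: alternative
-- what changed: Replaces the defaultdict accumulation pass with a distinct-key order pass plus a per-type filter/sort/slice dict comprehension (no grouping dict is maintained).
import Mathlib
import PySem

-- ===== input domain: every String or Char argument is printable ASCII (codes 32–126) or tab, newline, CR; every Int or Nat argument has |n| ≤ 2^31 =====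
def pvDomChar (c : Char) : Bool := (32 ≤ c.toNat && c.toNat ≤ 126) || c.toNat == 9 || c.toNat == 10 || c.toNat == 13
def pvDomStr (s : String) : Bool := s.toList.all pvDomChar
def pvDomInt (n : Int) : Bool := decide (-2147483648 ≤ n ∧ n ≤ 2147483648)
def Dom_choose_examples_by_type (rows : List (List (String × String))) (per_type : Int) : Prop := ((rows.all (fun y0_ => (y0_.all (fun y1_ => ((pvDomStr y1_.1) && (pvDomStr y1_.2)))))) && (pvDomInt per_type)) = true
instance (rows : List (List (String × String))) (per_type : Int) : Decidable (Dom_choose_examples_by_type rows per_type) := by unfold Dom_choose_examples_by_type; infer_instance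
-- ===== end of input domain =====

-- B replaces A's defaultdict grouping pass with a distinct-key order pass plus a
-- per-type filter/sort/slice dict comprehension (objective: alternative decomposition).


-- row lookup r['k'] : first match in the association list ('' only where Python raises KeyError, excluded by Pre_)
def pvRowGet (r : List (String × String)) (k : String) : String :=
  ((PySem.Dict.mk r).get? k).getD ""

-- ===== PORT A =====
def choose_examples_by_type (rows : List (List (String × String))) (per_type : Int) : List (String × List (List (String × String))) :=
  -- grouped = defaultdict(list); for r in rows: grouped[r['document_type']].append(r)
  let grouped : PySem.Dict String (List (List (String × String))) :=
    rows.foldl (fun d r => d.modify (pvRowGet r "document_type") [] (· ++ [r])) PySem.Dict.empty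
  -- chosen = {}; for doc_type, items in grouped.items(): chosen[doc_type] = sorted(items, key=vol)[:per_type]
  let chosen : PySem.Dict String (List (List (String × String))) :=
    grouped.items.foldl
      (fun c p =>
        c.insert p.1
          (PySem.List.slice (PySem.List.sorted p.2 (fun x => pvRowGet x "volume_id")) none (some per_type)))
      PySem.Dict.empty
  chosen.items

-- ===== PORT B =====
def choose_examples_by_type_alt (rows : List (List (String × String))) (per_type : Int) : List (String × List (List (String × String))) :=
  -- order = []; for r in rows: t = r['document_type']; if t not in order: order.append(t)
  let order : List String :=
    rows.foldl (fun o r =>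
      let t := pvRowGet r "document_type"
      if o.contains t then o else o ++ [t]) []
  -- {t: sorted([r for r in rows if r['document_type'] == t], key=vol)[:per_type] for t in order}
  (order.foldl
    (fun c t =>
      c.insert t
        (PySem.List.slice
          (PySem.List.sorted (rows.filter (fun r => pvRowGet r "document_type" == t))
            (fun x => pvRowGet x "volume_id"))
          none (some per_type)))
    PySem.Dict.empty).items

-- ===== PRECONDITION & SPEC =====
-- Pre_ excludes rows missing a 'document_type' or 'volume_id' key, on which A raises KeyError.
def Pre_choose_examples_by_type (rows : List (List (String × String))) (per_type : Int) : Prop :=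
  ∀ r ∈ rows, "document_type" ∈ r.map (·.1) ∧ "volume_id" ∈ r.map (·.1)
instance (rows : List (List (String × String))) (per_type : Int) : Decidable (Pre_choose_examples_by_type rows per_type) := by unfold Pre_choose_examples_by_type; infer_instance

def pvWitness_choose_examples_by_type : (List (List (String × String))) × Int :=
  ([[("document_type", "a"), ("volume_id", "2")], [("document_type", "a"), ("volume_id", "1")]], 1)

def Spec_choose_examples_by_type (rows : List (List (String × String))) (per_type : Int) (out : List (String × List (List (String × String)))) : Prop := out = choose_examples_by_type_alt rows per_type
instance (rows : List (List (String × String))) (per_type : Int) (out : List (String × List (List (String × String)))) : Decidable (Spec_choose_examples_by_type rows per_type out) := by unfold Spec_choose_examples_by_type; infer_instance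

-- ===== CLAIM (what is proved, stated in full; the proofs are below) =====
def Claim_equal_choose_examples_by_type : Prop := ∀ (rows : List (List (String × String))) (per_type : Int), Dom_choose_examples_by_type rows per_type → Pre_choose_examples_by_type rows per_type → Spec_choose_examples_by_type rows per_type (choose_examples_by_type rows per_type)

-- ===== LEMMAS AND PROOFS =====

-- a dict with distinct keys is its key list paired with its lookups
theorem pv_items_eq_keys_map {K V : Type} [BEq K] [LawfulBEq K]
    (d : PySem.Dict K V) (h : d.keys.Nodup) (dflt : V) :
    d.items = d.keys.map (fun t => (t, d.getD t dflt)) := by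
  have hk : d.keys = d.items.map (·.1) := by simp [PySem.Dict.keys]
  rw [hk, List.map_map]
  have h2 : ∀ p ∈ d.items, ((fun t => (t, d.getD t dflt)) ∘ (fun p => p.1)) p = id p := by
    intro p hp
    have hv : d.getD p.1 dflt = p.2 := PySem.Dict.getD_of_mem_items d (by simpa using hp) h dflt
    simp [hv]
  rw [List.map_congr_left h2, List.map_id]

theorem choose_equal (rows : List (List (String × String))) (per_type : Int) :
    choose_examples_by_type rows per_type = choose_examples_by_type_alt rows per_type := by
  show (let grouped := rows.foldl (fun d r => d.modify (pvRowGet r "document_type") [] (· ++ [r])) PySem.Dict.empty;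
      let chosen := grouped.items.foldl (fun c p => c.insert p.1 (PySem.List.slice (PySem.List.sorted p.2 (fun x => pvRowGet x "volume_id")) none (some per_type))) PySem.Dict.empty;
      chosen.items)
    = (let order := rows.foldl (fun o r => let t := pvRowGet r "document_type"; if o.contains t then o else o ++ [t]) [];
      (order.foldl (fun c t => c.insert t (PySem.List.slice (PySem.List.sorted (rows.filter (fun r => pvRowGet r "document_type" == t)) (fun x => pvRowGet x "volume_id")) none (some per_type))) PySem.Dict.empty).items)
  simp only []
  have hkeys : (rows.foldl (fun d r => d.modify (pvRowGet r "document_type") [] (· ++ [r]))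
      PySem.Dict.empty).keys = PySem.Set.ofList (rows.map (fun r => pvRowGet r "document_type")) := by
    rw [PySem.Dict.keys_foldl_modify_key rows (fun r => pvRowGet r "document_type") []
      (fun _ r v => v ++ [r]) PySem.Dict.empty]
    simp [PySem.Set.update, PySem.Set.ofList_eq_foldl, PySem.Dict.keys_empty]
  have hnodup : (rows.foldl (fun d r => d.modify (pvRowGet r "document_type") [] (· ++ [r]))
      PySem.Dict.empty).keys.Nodup := by
    rw [hkeys]; exact PySem.Set.nodup_ofList _
  have hgetD : ∀ t, (rows.foldl (fun d r => d.modify (pvRowGet r "document_type") [] (· ++ [r]))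
      PySem.Dict.empty).getD t []
      = rows.filter (fun r => pvRowGet r "document_type" == t) := by
    intro t
    rw [show rows.foldl (fun d r => d.modify (pvRowGet r "document_type") [] (· ++ [r]))
        PySem.Dict.empty
      = (rows.map (fun r => (pvRowGet r "document_type", r))).foldl
        (fun d p => d.modify p.1 [] (· ++ [p.2])) PySem.Dict.empty from by rw [List.foldl_map]]
    rw [PySem.Dict.getD_foldl_modify_append]
    simp [PySem.Dict.getD_empty, List.filter_map, Function.comp_def, List.map_map]
  have hitems : (rows.foldl (fun d r => d.modify (pvRowGet r "document_type") [] (· ++ [r]))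
      PySem.Dict.empty).items
      = (PySem.Set.ofList (rows.map (fun r => pvRowGet r "document_type"))).map
          (fun t => (t, rows.filter (fun r => pvRowGet r "document_type" == t))) := by
    rw [pv_items_eq_keys_map _ hnodup [], hkeys]
    exact List.map_congr_left (fun t _ => by rw [hgetD])
  have horder : rows.foldl (fun o r =>
        let t := pvRowGet r "document_type"
        if o.contains t then o else o ++ [t]) []
      = PySem.Set.ofList (rows.map (fun r => pvRowGet r "document_type")) := by
    rw [PySem.Set.ofList_eq_foldl, List.foldl_map]
    exact PySem.List.foldl_congr_mem rows _ _ []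
      (fun o r _ => rfl)
  rw [horder, hitems, List.foldl_map]

-- ===== VERDICT (by name: the statement is the Claim_ definition above) =====
theorem choose_examples_by_type_spec : Claim_equal_choose_examples_by_type := by
  intro rows per_type _ _
  exact choose_equal rows per_type
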